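-- pv_equiv track=rewrite | github.com/ArshiaRx/Computer-Science-I | labs109.py | create_zigzag
-- ===== SOURCE A (Python) =====
-- def create_zigzag(rows, cols, start=1):
--     result = []     #result is a list
--     for i in range(rows):    #for every element in range of rows create a list
--         new_lis = []            #creating a temperary list name new_lis
--
--         for j in range(cols):    #for every element in range of cols in new_lis
--             new_lis.append(start)        #start the new list with start which is
--             start += 1       #equal to one, and for every element in range
--                                         #increment by one
--
--         if i % 2 == 1:              #if the the element of i is odd
--             new_lis.reverse()          #reverse the temp list 'new_lis' element
--         result.append(new_lis)              #include it in result and return it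
--     return result
-- ===== SOURCE B (Python) =====
-- def create_zigzag(rows, cols, start=1):
--     # Generate the whole flat sequence first, then reshape into rows,
--     # reversing every odd-indexed chunk.
--     seq = [start + k for k in range(max(rows, 0) * max(cols, 0))]
--     result = []
--     for i in range(rows):
--         chunk = seq[i * cols:(i + 1) * cols]
--         if i % 2 == 1:
--             chunk.reverse()
--         result.append(chunk)
--     return result
-- ===== Notes on version B (the rewrite author's own statement) =====
-- stated objective: alternative
-- what changed: B generates the flat number sequence in one pass and then reshapes it by slicing into cols-sized chunks (reversing odd chunks), instead of threading a running counter through nested loops.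
import Mathlib
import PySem

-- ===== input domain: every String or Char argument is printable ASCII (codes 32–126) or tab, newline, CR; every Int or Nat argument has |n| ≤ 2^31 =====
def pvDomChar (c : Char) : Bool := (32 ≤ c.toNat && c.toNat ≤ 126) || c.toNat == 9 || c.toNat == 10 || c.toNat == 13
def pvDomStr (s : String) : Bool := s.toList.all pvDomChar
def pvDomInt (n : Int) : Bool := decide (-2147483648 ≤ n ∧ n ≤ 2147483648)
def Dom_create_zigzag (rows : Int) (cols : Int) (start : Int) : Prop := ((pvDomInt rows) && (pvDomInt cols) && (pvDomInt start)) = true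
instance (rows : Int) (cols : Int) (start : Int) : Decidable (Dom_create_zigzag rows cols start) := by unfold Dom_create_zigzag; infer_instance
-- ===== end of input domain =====

-- B builds the flat sequence first and reshapes it by slicing, instead of A's
-- nested loops threading a counter; same cost, different decomposition.

-- ===== PORT A =====
def create_zigzag (rows : Int) (cols : Int) (start : Int) : List (List Int) :=
  -- result = []; for i in range(rows): inner loop over range(cols) appending start and incrementing
  let st :=
    (PySem.List.pyRange 0 rows 1).foldl
      (fun (st : List (List Int) × Int) i =>
        let inner :=
          (PySem.List.pyRange 0 cols 1).foldl
            (fun (p : List Int × Int) _ => (p.1 ++ [p.2], p.2 + 1)) ([], st.2)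
        let new_lis := if i % 2 == 1 then inner.1.reverse else inner.1
        (st.1 ++ [new_lis], inner.2))
      ([], start)
  st.1

-- ===== PORT B =====
def create_zigzag_alt (rows : Int) (cols : Int) (start : Int) : List (List Int) :=
  -- seq = [start + k for k in range(rows*cols)]
  let seq := (PySem.List.pyRange 0 (max rows 0 * max cols 0) 1).map (fun k => start + k)
  (PySem.List.pyRange 0 rows 1).foldl
    (fun (result : List (List Int)) i =>
      let chunk := PySem.List.slice seq (some (i * cols)) (some ((i + 1) * cols))
      let chunk := if i % 2 == 1 then chunk.reverse else chunk
      result ++ [chunk])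
    []

-- ===== PRECONDITION & SPEC =====
def Spec_create_zigzag (rows : Int) (cols : Int) (start : Int) (out : List (List Int)) : Prop := out = create_zigzag_alt rows cols start
instance (rows : Int) (cols : Int) (start : Int) (out : List (List Int)) : Decidable (Spec_create_zigzag rows cols start out) := by unfold Spec_create_zigzag; infer_instance

-- ===== CLAIM (what is proved, stated in full; the proofs are below) =====
def Claim_equal_create_zigzag : Prop := ∀ (rows : Int) (cols : Int) (start : Int), Dom_create_zigzag rows cols start → Spec_create_zigzag rows cols start (create_zigzag rows cols start)

-- ===== LEMMAS AND PROOFS =====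

-- one row of the intended result, as a closed form
def pvRow (C : Nat) (s : Int) : List Int := (List.range C).map (fun (j : Nat) => s + (j : Int))

-- the normal form both ports are reduced to
def pvZig (rows cols : Int) (start : Int) : List (List Int) :=
  (List.range rows.toNat).map (fun (k : Nat) =>
    let r := pvRow cols.toNat (start + k * cols.toNat)
    if k % 2 = 1 then r.reverse else r)

theorem pvRow_succ (n : Nat) (s : Int) : pvRow (n + 1) s = s :: pvRow n (s + 1) := by
  simp only [pvRow, List.range_succ_eq_map, List.map_cons, List.map_map]
  congr 1
  · simp
  apply List.map_congr_left
  intro j _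
  simp only [Function.comp]
  push_cast
  ring

-- A's inner loop
theorem innerA (L : List Int) (lis : List Int) (s : Int) :
    L.foldl (fun (p : List Int × Int) _ => (p.1 ++ [p.2], p.2 + 1)) (lis, s)
      = (lis ++ pvRow L.length s, s + L.length) := by
  induction L generalizing lis s with
  | nil => simp [pvRow]
  | cons a L ih =>
      simp only [List.foldl_cons, ih, List.length_cons, pvRow_succ]
      refine Prod.ext (by simp) (by push_cast; ring)

-- parity condition of the ports, in Nat form
theorem parity_cast (k : Nat) :
    ((((0 : Int) + (k : Int)) % 2 == 1) = true) = (k % 2 = 1) := by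
  rcases Nat.even_or_odd k with ⟨m, hm⟩ | ⟨m, hm⟩ <;> subst hm <;> simp <;> omega

-- A's outer loop, after the inner loop is replaced by its closed form
theorem outerA (R : Nat) (C : Nat) (start : Int) (acc : List (List Int)) :
    ((List.range R).foldl
        (fun (st : List (List Int) × Int) (k : Nat) =>
          (st.1 ++ [if (((0 : Int) + (k : Int)) % 2 == 1)
                      then (pvRow C st.2).reverse else pvRow C st.2],
            st.2 + C))
        (acc, start))
      = (acc ++ (List.range R).map (fun (k : Nat) =>
            let r := pvRow C (start + k * C)
            if k % 2 = 1 then r.reverse else r),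
          start + R * C) := by
  induction R with
  | zero => simp
  | succ n ih =>
      rw [List.range_succ, List.foldl_append, ih]
      simp only [List.foldl_cons, List.foldl_nil, List.map_append, List.map_cons,
        List.map_nil, parity_cast]
      refine Prod.ext (by simp) (by push_cast; ring)

theorem A_eq_zig (rows cols start : Int) :
    create_zigzag rows cols start = pvZig rows cols start := by
  unfold create_zigzag pvZig
  rw [PySem.List.pyRange_one 0 rows, List.foldl_map]
  simp only [innerA, PySem.List.length_pyRange_one, List.nil_append, Int.sub_zero]
  rw [outerA]
  simp

-- B's outer loop is a map
theorem foldl_app {A : Type} (g : A → List Int) (L : List A) (acc : List (List Int)) :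
    L.foldl (fun (r : List (List Int)) i => r ++ [g i]) acc = acc ++ L.map g := by
  induction L generalizing acc with
  | nil => simp
  | cons a L ih => simp [ih]

-- the chunk B slices out of the flat sequence is exactly the intended row
theorem chunk_eq (rows cols start : Int) (k : Nat) (hk : k < rows.toNat) :
    PySem.List.slice ((PySem.List.pyRange 0 (max rows 0 * max cols 0) 1).map (fun j => start + j))
        (some (((0 : Int) + (k : Int)) * cols)) (some (((0 : Int) + (k : Int) + 1) * cols))
      = pvRow cols.toNat (start + k * cols.toNat) := by
  have hrows : 0 < rows := by omega
  by_cases hc : cols ≤ 0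
  · -- flat sequence is empty; both sides are []
    have h1 : max rows 0 * max cols 0 = 0 := by
      have : max cols 0 = 0 := by omega
      simp [this]
    have h2 : PySem.List.pyRange 0 (max rows 0 * max cols 0) 1 = [] :=
      PySem.List.pyRange_one_eq_nil (by omega)
    have h3 : cols.toNat = 0 := by omega
    simp [h2, h3, pvRow, PySem.List.slice]
  · rw [not_le] at hc
    set R := rows.toNat with hR
    set C := cols.toNat with hC
    have hcols : (cols : Int) = (C : Int) := by omega
    have hrc : (rows : Int) = (R : Int) := by omega
    have ha : ((0 : Int) + (k : Int)) * cols = ((k * C : Nat) : Int) := by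
      rw [hcols]; push_cast; ring
    have hb : ((0 : Int) + (k : Int) + 1) * cols = (((k + 1) * C : Nat) : Int) := by
      rw [hcols]; push_cast; ring
    have hlen : ((PySem.List.pyRange 0 (max rows 0 * max cols 0) 1).map (fun j => start + j)).length
        = R * C := by
      have hmax : max rows 0 * max cols 0 = ((R * C : Nat) : Int) := by
        push_cast
        rw [← hrc, ← hcols]
        have h1 : max rows 0 = rows := by omega
        have h2 : max cols 0 = cols := by omega
        rw [h1, h2]
      rw [List.length_map, PySem.List.length_pyRange_one, hmax, Int.sub_zero,
        Int.toNat_natCast]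
    rw [ha, hb, PySem.List.slice_natCast]
    have hkk : (k + 1) * C ≤ R * C := Nat.mul_le_mul_right C hk
    have hCpos : 0 < C := by omega
    have hmul : (k + 1) * C = k * C + C := by ring
    apply List.ext_getElem
    · simp only [List.length_take, List.length_drop, hlen, pvRow, List.length_map,
        List.length_range]
      omega
    · intro i h1 h2
      have hiC : i < C := by
        simp only [pvRow, List.length_map, List.length_range] at h2
        exact h2
      have hidx : k * C + i < R * C := by omega
      simp only [List.getElem_take, List.getElem_drop, List.getElem_map, pvRow,
        List.getElem_range]
      rw [PySem.List.getElem_pyRange_one]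
      push_cast
      ring

theorem B_eq_zig (rows cols start : Int) :
    create_zigzag_alt rows cols start = pvZig rows cols start := by
  unfold create_zigzag_alt pvZig
  rw [PySem.List.pyRange_one 0 rows, List.foldl_map, Int.sub_zero]
  rw [foldl_app (g := fun (k : Nat) =>
    if (((0 : Int) + (k : Int)) % 2 == 1)
      then (PySem.List.slice ((PySem.List.pyRange 0 (max rows 0 * max cols 0) 1).map (fun k => start + k))
            (some (((0 : Int) + (k : Int)) * cols)) (some (((0 : Int) + (k : Int) + 1) * cols))).reverse
      else PySem.List.slice ((PySem.List.pyRange 0 (max rows 0 * max cols 0) 1).map (fun k => start + k))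
            (some (((0 : Int) + (k : Int)) * cols)) (some (((0 : Int) + (k : Int) + 1) * cols)))]
  simp only [List.nil_append]
  apply List.map_congr_left
  intro k hk
  rw [List.mem_range] at hk
  rw [chunk_eq rows cols start k hk]
  simp only [parity_cast]

-- ===== VERDICT (by name: the statement is the Claim_ definition above) =====
theorem create_zigzag_spec : Claim_equal_create_zigzag := by
  intro rows cols start _
  unfold Spec_create_zigzag
  rw [A_eq_zig, B_eq_zig]
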